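-- pv_equiv track=rewrite | github.com/SunLing134340/Accelerating_Automatic_Search | 1.Source-Code/2.LBlock/1.Differential-Active-Sbox/SearchWithCadical.py | CountClausesInRoundFunction
-- ===== SOURCE A (Python) =====
-- NumOfConstraint = [34, 34, 34, 34, 34, 34, 34, 34]
--
-- def CountClausesInRoundFunction(Round, ActiveSbox, clause_num):
--     count = clause_num
--     # Nonzero input
--     count += 1
--     # Cluases for Round function
--     for r in range(Round):
--         for block in range(8):
--             count += NumOfConstraint[block]
--         for i in range (32):
--             count += 4
--             count += 2
--     return count
-- ===== SOURCE B (Python) =====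
-- def CountClausesInRoundFunction(Round, ActiveSbox, clause_num):
--     # Each round adds a fixed 8*34 + 32*(4+2) = 464 clauses; closed form, O(1).
--     return clause_num + 1 + 464 * max(Round, 0)
-- ===== Notes on version B (the rewrite author's own statement) =====
-- stated objective: faster
-- what changed: Replaced the O(Round) nested loops (which add a constant 464 per round) with the closed-form clause_num + 1 + 464*max(Round, 0).
import Mathlib
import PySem

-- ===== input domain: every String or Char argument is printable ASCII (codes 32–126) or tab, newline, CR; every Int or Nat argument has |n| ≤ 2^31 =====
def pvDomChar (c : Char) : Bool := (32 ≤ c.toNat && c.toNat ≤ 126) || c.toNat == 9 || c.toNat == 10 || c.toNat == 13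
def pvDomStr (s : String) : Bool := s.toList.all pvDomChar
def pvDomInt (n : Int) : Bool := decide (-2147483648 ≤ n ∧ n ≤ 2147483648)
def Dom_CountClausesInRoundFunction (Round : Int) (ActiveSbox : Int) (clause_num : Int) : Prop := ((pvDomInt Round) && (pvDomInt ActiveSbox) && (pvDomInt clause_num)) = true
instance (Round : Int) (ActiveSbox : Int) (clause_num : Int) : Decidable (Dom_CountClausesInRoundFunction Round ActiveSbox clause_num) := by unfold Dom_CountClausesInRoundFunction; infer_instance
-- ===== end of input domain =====

-- B replaces A's per-round loops (adding a constant 464 per round) with a closed form: faster (O(1) vs O(Round)).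

-- ===== PORT A =====
def NumOfConstraint : List Int := [34, 34, 34, 34, 34, 34, 34, 34]

def CountClausesInRoundFunction (Round : Int) (ActiveSbox : Int) (clause_num : Int) : Int :=
  let count := clause_num
  let count := count + 1
  (PySem.List.pyRange 0 Round 1).foldl (fun count _r =>
    let count := (PySem.List.pyRange 0 8 1).foldl
      (fun c block => c + PySem.List.pyGetD NumOfConstraint block 0) count
    (PySem.List.pyRange 0 32 1).foldl (fun c _i => (c + 4) + 2) count) count

-- ===== PORT B =====
def CountClausesInRoundFunction_alt (Round : Int) (ActiveSbox : Int) (clause_num : Int) : Int :=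
  clause_num + 1 + 464 * max Round 0

-- ===== PRECONDITION & SPEC =====
def Spec_CountClausesInRoundFunction (Round : Int) (ActiveSbox : Int) (clause_num : Int) (out : Int) : Prop := out = CountClausesInRoundFunction_alt Round ActiveSbox clause_num
instance (Round : Int) (ActiveSbox : Int) (clause_num : Int) (out : Int) : Decidable (Spec_CountClausesInRoundFunction Round ActiveSbox clause_num out) := by unfold Spec_CountClausesInRoundFunction; infer_instance

-- ===== CLAIM (what is proved, stated in full; the proofs are below) =====
def Claim_equal_CountClausesInRoundFunction : Prop := ∀ (Round : Int) (ActiveSbox : Int) (clause_num : Int), Dom_CountClausesInRoundFunction Round ActiveSbox clause_num → Spec_CountClausesInRoundFunction Round ActiveSbox clause_num (CountClausesInRoundFunction Round ActiveSbox clause_num)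

-- ===== LEMMAS AND PROOFS =====

-- one round-body application adds exactly 464
lemma round_body_eq (c : Int) :
    ((PySem.List.pyRange 0 32 1).foldl (fun c _i => (c + 4) + 2)
      ((PySem.List.pyRange 0 8 1).foldl
        (fun c block => c + PySem.List.pyGetD NumOfConstraint block 0) c)) = c + 464 := by
  simp [PySem.List.pyRange, PySem.List.pyGetD, PySem.List.pyIdx?, PySem.List.pyGet?,
    NumOfConstraint, List.range_succ]
  ring

lemma foldl_const_add (l : List Int) (c : Int) :
    l.foldl (fun c _ => c + 464) c = c + 464 * l.length := by
  induction l generalizing c with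
  | nil => simp
  | cons x xs ih => simp [List.foldl, ih]; ring

-- ===== VERDICT (by name: the statement is the Claim_ definition above) =====
theorem CountClausesInRoundFunction_spec : Claim_equal_CountClausesInRoundFunction := by
  intro Round ActiveSbox clause_num _
  unfold Spec_CountClausesInRoundFunction CountClausesInRoundFunction CountClausesInRoundFunction_alt
  have hb : (fun count (_r : Int) =>
      (PySem.List.pyRange 0 32 1).foldl (fun c _i => (c + 4) + 2)
        ((PySem.List.pyRange 0 8 1).foldl
          (fun c block => c + PySem.List.pyGetD NumOfConstraint block 0) count))
      = (fun c (_ : Int) => c + 464) := by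
    funext c _
    exact round_body_eq c
  simp only [hb, foldl_const_add, PySem.List.length_pyRange_one]
  have : ((Round - 0).toNat : Int) = max Round 0 := by omega
  rw [this]
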